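-- pv_equiv track=rewrite | github.com/Sembiance/dexvert | bin/ilbm2apng/ilbm2apng.py | is_dctv
-- ===== SOURCE A (Python) =====
-- def get_bitplane_pixel(data, row_offset, x, bytes_per_plane_row, num_planes):
--     """Extract pixel index from planar data."""
--     byte_idx = x // 8
--     bit = 7 - (x % 8)
--     pixel = 0
--     for plane in range(num_planes):
--         off = row_offset + plane * bytes_per_plane_row + byte_idx
--         if off < len(data) and (data[off] >> bit) & 1:
--             pixel |= (1 << plane)
--     return pixel
--
-- def get_dctv_value(data, row_offset, x, bytes_per_plane_row, num_planes, palette):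
--     """Get the DCTV 7-bit value from bitplane data via palette lookup.
--
--     Returns a value in format 0I0R0B0G (bits 6,4,2,0):
--     - I = intensity bit (bit 4 of blue component)
--     - R = MSB of red component
--     - B = MSB of blue component
--     - G = MSB of green component
--     """
--     idx = get_bitplane_pixel(data, row_offset, x, bytes_per_plane_row, num_planes)
--     if idx >= len(palette):
--         return 0
--     r, g, b = palette[idx]
--     rgb = (r << 16) | (g << 8) | b
--     return ((rgb << 2) & 0x40) | ((rgb >> 19) & 0x10) | ((rgb >> 5) & 4) | ((rgb >> 15) & 1)
--
-- def is_dctv(data, row_offset, width, bytes_per_plane_row, num_planes, palette):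
--     """Check if a line contains the DCTV LFSR signature."""
--     if width < 256 or num_planes < 2 or not palette:
--         return False
--     # First pixel's I bit (bit 6 of DCTV value) must be 0
--     if get_dctv_value(data, row_offset, 0, bytes_per_plane_row, num_planes, palette) >> 6 != 0:
--         return False
--     # Check LFSR sequence against I bits of pixels 1-255
--     r = 0x7d
--     for x in range(1, 256):
--         dv = get_dctv_value(data, row_offset, x, bytes_per_plane_row, num_planes, palette)
--         if (dv >> 6) == (r & 1):
--             return False
--         if (r & 1) != 0:
--             r ^= (0xc3 << 1)
--         r >>= 1
--     return True
-- ===== SOURCE B (Python) =====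
-- # Expected intensity bit of each of the first 256 pixels of a DCTV line:
-- # pixel 0's bit is 0 and pixels 1..255 carry the complement of the fixed LFSR
-- # stream (seed 0x7d, taps 0xc3<<1), which is input-independent.
-- _SIGNATURE = [0, 0, 0, 0, 0, 0, 0, 0, 0, 1, 0, 0, 1, 0, 0, 1, 1, 0, 0, 0, 0, 1, 1, 1, 0, 0, 1, 0, 1, 0, 0, 0, 1, 1, 0, 1, 1, 1, 1, 0, 0, 0, 0, 1, 0, 0, 0, 1, 0, 0, 0, 0, 1, 0, 1, 1, 1, 1, 1, 0, 1, 1, 1, 1, 1, 1, 0, 1, 0, 0, 1, 0, 0, 0, 0, 0, 1, 1, 0, 0, 1, 0, 0, 0, 1, 1, 1, 0, 1, 0, 0, 0, 1, 0, 1, 1, 0, 0, 1, 1, 0, 1, 0, 1, 0, 1, 0, 1, 1, 0, 1, 1, 0, 1, 1, 1, 0, 1, 0, 1, 1, 1, 1, 0, 1, 1, 0, 0, 1, 0, 1, 1, 1, 0, 0, 0, 0, 0, 1, 0, 1, 0, 0, 1, 0, 1, 1, 0, 1, 0, 1, 1, 0, 0, 0, 0, 0, 0, 1, 1, 1, 1,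 1, 1, 1, 0, 0, 1, 0, 0, 1, 0, 1, 0, 1, 1, 1, 0, 1, 1, 0, 1, 0, 0, 0, 0, 1, 1, 0, 1, 0, 0, 1, 1, 1, 0, 1, 1, 1, 0, 0, 1, 1, 0, 0, 1, 1, 1, 0, 0, 0, 1, 1, 1, 1, 0, 0, 1, 1, 1, 1, 1, 0, 0, 0, 1, 0, 0, 1, 1, 1, 1, 0, 1, 0, 1, 0, 0, 1, 1, 0, 1, 1, 0, 0, 0, 1, 1, 0, 0, 0, 1, 0, 1, 0, 1]
--
-- def _dctv_of(r, g, b):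
--     """DCTV 0I0R0B0G value of one palette entry."""
--     rgb = (r << 16) | (g << 8) | b
--     return ((rgb << 2) & 0x40) | ((rgb >> 19) & 0x10) | ((rgb >> 5) & 4) | ((rgb >> 15) & 1)
--
-- def is_dctv(data, row_offset, width, bytes_per_plane_row, num_planes, palette):
--     """Check if a line contains the DCTV LFSR signature: decode the row's first
--     256 pixel indices byte-wise (one 32-byte strip per plane, expanded to bits,
--     OR-combined across planes), look their intensity bits up in a per-palette
--     table built once, and compare the bit list with the fixed signature."""
--     if width < 256 or num_planes < 2 or not palette:
--         return False
--     n = len(data)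
--     pixels = [0] * 256
--     for p in range(num_planes):
--         base = row_offset + p * bytes_per_plane_row
--         row = []
--         for byte_idx in range(32):
--             v = data[base + byte_idx] if base + byte_idx < n else 0
--             for k in range(8):
--                 sh = (7 - k)
--                 row.append((v >> sh) & 1)
--         pixels = [acc | (bit << p) for acc, bit in zip(pixels, row)]
--     table = [_dctv_of(r, g, b) for (r, g, b) in palette]
--     ibits = [table[i] >> 6 if i < len(table) else 0 for i in pixels]
--     return ibits == _SIGNATURE
-- ===== Notes on version B (the rewrite author's own statement) =====
-- stated objective: alternative
-- what changed: A walks pixels 0..255 one at a time, re-extracting each pixel across all bitplanes and re-running the palette/DCTV computation per pixel while stepping an LFSR and early-returning on mismatch; B is a staged pipeline: it decodes the 256 pixel indices byte-wise (one 32-byte strip per plane expanded to bits and OR-combined across planes), builds the DCTV intensity table once per palette entry, and compares the resulting 256-entry intensity-bit list for equality with a fixed literal signature (no LFSR code at all).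
import Mathlib
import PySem

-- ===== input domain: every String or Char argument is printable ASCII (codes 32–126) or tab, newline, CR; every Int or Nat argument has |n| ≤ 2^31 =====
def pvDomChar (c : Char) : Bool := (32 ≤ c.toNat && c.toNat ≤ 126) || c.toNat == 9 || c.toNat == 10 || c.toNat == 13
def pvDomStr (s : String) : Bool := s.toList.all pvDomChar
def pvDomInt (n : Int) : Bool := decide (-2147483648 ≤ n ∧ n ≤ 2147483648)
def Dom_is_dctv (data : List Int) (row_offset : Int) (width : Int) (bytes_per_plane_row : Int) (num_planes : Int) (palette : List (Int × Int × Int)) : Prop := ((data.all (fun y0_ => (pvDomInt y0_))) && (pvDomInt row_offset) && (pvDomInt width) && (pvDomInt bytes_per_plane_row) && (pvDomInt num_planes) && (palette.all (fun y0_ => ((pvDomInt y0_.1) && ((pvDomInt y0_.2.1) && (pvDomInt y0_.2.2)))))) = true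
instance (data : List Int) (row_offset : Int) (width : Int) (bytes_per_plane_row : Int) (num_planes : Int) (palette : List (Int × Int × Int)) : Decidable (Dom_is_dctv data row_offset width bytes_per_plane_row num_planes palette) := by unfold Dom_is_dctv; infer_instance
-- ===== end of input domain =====

-- B replaces A's per-pixel scan (bitplane extraction + palette DCTV value + interleaved LFSR
-- stepping, per pixel) by a staged pipeline: byte-wise plane decode, a once-built palette
-- intensity table, and list equality against a fixed literal signature (alternative, same cost).


-- ===== PORT A =====
-- get_bitplane_pixel: extract pixel index from planar data.  data[off] wraps for negative off
-- (Python semantics); Pre_is_dctv excludes the inputs where some reached off < -len(data)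
-- (IndexError), so the pyGetD default 0 is never the value used.
def get_bitplane_pixel (data : List Int) (row_offset : Int) (x : Int) (bytes_per_plane_row : Int) (num_planes : Int) : Int :=
  let byte_idx := PySem.Int.floordiv x 8
  let bit := (7 - PySem.Int.mod x 8).toNat
  (PySem.List.pyRange 0 num_planes 1).foldl
    (fun pixel plane =>
      let off := row_offset + plane * bytes_per_plane_row + byte_idx
      if off < (data.length : Int) ∧ PySem.Int.band (PySem.List.pyGetD data off 0 >>> bit) 1 ≠ 0
      then PySem.Int.bor pixel ((1:Int) <<< plane.toNat)
      else pixel) 0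

-- get_dctv_value: palette lookup giving the DCTV 0I0R0B0G value.
def get_dctv_value (data : List Int) (row_offset : Int) (x : Int) (bytes_per_plane_row : Int) (num_planes : Int) (palette : List (Int × Int × Int)) : Int :=
  let idx := get_bitplane_pixel data row_offset x bytes_per_plane_row num_planes
  if idx ≥ (palette.length : Int) then 0
  else
    let t := PySem.List.pyGetD palette idx (0, 0, 0)  -- 0 ≤ idx < len palette here, so in range
    let rgb := PySem.Int.bor (PySem.Int.bor (t.1 <<< (16:Nat)) (t.2.1 <<< (8:Nat))) t.2.2
    PySem.Int.bor (PySem.Int.bor (PySem.Int.bor (PySem.Int.band (rgb <<< (2:Nat)) 0x40) (PySem.Int.band (rgb >>> (19:Nat)) 0x10)) (PySem.Int.band (rgb >>> (5:Nat)) 4)) (PySem.Int.band (rgb >>> (15:Nat)) 1)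

-- A's `for x in range(1, 256)` with mutable r and early return, as structural recursion.
def is_dctv_loop (data : List Int) (row_offset : Int) (bytes_per_plane_row : Int) (num_planes : Int) (palette : List (Int × Int × Int)) : List Int → Int → Bool
  | [], _ => true
  | x :: rest, r =>
    let dv := get_dctv_value data row_offset x bytes_per_plane_row num_planes palette
    if (dv >>> (6:Nat)) == PySem.Int.band r 1 then false
    else
      let r' := if PySem.Int.band r 1 ≠ 0 then PySem.Int.bxor r (0xc3 <<< (1:Nat)) else r
      is_dctv_loop data row_offset bytes_per_plane_row num_planes palette rest (r' >>> (1:Nat))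

def is_dctv (data : List Int) (row_offset : Int) (width : Int) (bytes_per_plane_row : Int) (num_planes : Int) (palette : List (Int × Int × Int)) : Bool :=
  if width < 256 ∨ num_planes < 2 ∨ palette = [] then false
  else if (get_dctv_value data row_offset 0 bytes_per_plane_row num_planes palette) >>> (6:Nat) != 0 then false
  else is_dctv_loop data row_offset bytes_per_plane_row num_planes palette (PySem.List.pyRange 1 256 1) 0x7d

-- ===== PORT B =====
-- Source B's module-level _SIGNATURE: the expected intensity bit of each of the first 256 pixels.
def dctvSignature : List Int := [0, 0, 0, 0, 0, 0, 0, 0, 0, 1, 0, 0, 1, 0, 0, 1, 1, 0, 0, 0, 0, 1, 1, 1, 0, 0, 1, 0, 1, 0, 0, 0, 1, 1, 0, 1, 1, 1, 1, 0, 0, 0, 0, 1, 0, 0, 0, 1, 0, 0, 0, 0, 1, 0, 1, 1, 1, 1, 1, 0, 1, 1, 1, 1, 1, 1, 0, 1, 0, 0, 1, 0, 0, 0, 0, 0, 1, 1, 0, 0, 1, 0, 0, 0, 1, 1, 1, 0, 1, 0, 0, 0, 1, 0, 1, 1, 0, 0, 1, 1, 0, 1, 0, 1, 0, 1, 0, 1,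 1, 0, 1, 1, 0, 1, 1, 1, 0, 1, 0, 1, 1, 1, 1, 0, 1, 1, 0, 0, 1, 0, 1, 1, 1, 0, 0, 0, 0, 0, 1, 0, 1, 0, 0, 1, 0, 1, 1, 0, 1, 0, 1, 1, 0, 0, 0, 0, 0, 0, 1, 1, 1, 1, 1, 1, 1, 0, 0, 1, 0, 0, 1, 0, 1, 0, 1, 1, 1, 0, 1, 1, 0, 1, 0, 0, 0, 0, 1, 1, 0, 1, 0, 0, 1, 1, 1, 0, 1, 1, 1, 0, 0, 1, 1, 0, 0, 1, 1, 1, 0, 0, 0, 1, 1, 1, 1, 0, 0, 1, 1, 1, 1, 1, 0, 0, 0, 1, 0, 0, 1, 1, 1, 1, 0, 1, 0, 1, 0, 0, 1, 1, 0, 1, 1, 0, 0, 0, 1, 1, 0, 0, 0, 1, 0, 1, 0, 1]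

-- Source B's _dctv_of: DCTV 0I0R0B0G value of one palette entry.
def dctvOf (r g b : Int) : Int :=
  let rgb := PySem.Int.bor (PySem.Int.bor (r <<< (16:Nat)) (g <<< (8:Nat))) b
  PySem.Int.bor (PySem.Int.bor (PySem.Int.bor (PySem.Int.band (rgb <<< (2:Nat)) 0x40) (PySem.Int.band (rgb >>> (19:Nat)) 0x10)) (PySem.Int.band (rgb >>> (5:Nat)) 4)) (PySem.Int.band (rgb >>> (15:Nat)) 1)

-- Source B's inner byte loop: one plane's 32-byte strip expanded to 256 bits.
def planeRowBits (data : List Int) (base : Int) : List Int :=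
  (PySem.List.pyRange 0 32 1).foldl (fun row byte_idx =>
    let v : Int := if base + byte_idx < (data.length : Int) then PySem.List.pyGetD data (base + byte_idx) 0 else 0
    (PySem.List.pyRange 0 8 1).foldl (fun row k =>
      let sh : Nat := (7 - k).toNat
      row ++ [PySem.Int.band (v >>> sh) 1]) row) []

def is_dctv_alt (data : List Int) (row_offset : Int) (width : Int) (bytes_per_plane_row : Int) (num_planes : Int) (palette : List (Int × Int × Int)) : Bool :=
  if width < 256 ∨ num_planes < 2 ∨ palette = [] then false
  else
    let pixels := (PySem.List.pyRange 0 num_planes 1).foldl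
      (fun pixels p =>
        (pixels.zip (planeRowBits data (row_offset + p * bytes_per_plane_row))).map
          (fun ab => PySem.Int.bor ab.1 ((ab.2 : Int) <<< p.toNat)))
      (List.replicate 256 (0 : Int))
    let table := palette.map (fun t => dctvOf t.1 t.2.1 t.2.2)
    let ibits := pixels.map (fun i =>
      if i < (table.length : Int) then PySem.List.pyGetD table i 0 >>> (6:Nat) else 0)
    ibits == dctvSignature

-- ===== PRECONDITION & SPEC =====
-- Exactly the inputs on which Python A returns normally: when the three guards all pass, the
-- minimal byte offset row_offset + min(0, (num_planes-1)*bytes_per_plane_row) is already reached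
-- while reading pixel 0, and Python's data[off] raises IndexError iff that minimum is below
-- -len(data).
def Pre_is_dctv (data : List Int) (row_offset : Int) (width : Int) (bytes_per_plane_row : Int) (num_planes : Int) (palette : List (Int × Int × Int)) : Prop :=
  width < 256 ∨ num_planes < 2 ∨ palette = [] ∨
    -(data.length : Int) ≤ row_offset + min 0 ((num_planes - 1) * bytes_per_plane_row)
instance (data : List Int) (row_offset : Int) (width : Int) (bytes_per_plane_row : Int) (num_planes : Int) (palette : List (Int × Int × Int)) : Decidable (Pre_is_dctv data row_offset width bytes_per_plane_row num_planes palette) := by unfold Pre_is_dctv; infer_instance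

def pvWitness_is_dctv : List Int × Int × Int × Int × Int × (List (Int × Int × Int)) :=
  ([0, 255, 0], 0, 256, 1, 2, [(0, 0, 0), (0, 0, 16)])

def Spec_is_dctv (data : List Int) (row_offset : Int) (width : Int) (bytes_per_plane_row : Int) (num_planes : Int) (palette : List (Int × Int × Int)) (out : Bool) : Prop := out = is_dctv_alt data row_offset width bytes_per_plane_row num_planes palette
instance (data : List Int) (row_offset : Int) (width : Int) (bytes_per_plane_row : Int) (num_planes : Int) (palette : List (Int × Int × Int)) (out : Bool) : Decidable (Spec_is_dctv data row_offset width bytes_per_plane_row num_planes palette out) := by unfold Spec_is_dctv; infer_instance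

-- ===== CLAIM (what is proved, stated in full; the proofs are below) =====
def Claim_equal_is_dctv : Prop := ∀ (data : List Int) (row_offset : Int) (width : Int) (bytes_per_plane_row : Int) (num_planes : Int) (palette : List (Int × Int × Int)), Dom_is_dctv data row_offset width bytes_per_plane_row num_planes palette → Pre_is_dctv data row_offset width bytes_per_plane_row num_planes palette → Spec_is_dctv data row_offset width bytes_per_plane_row num_planes palette (is_dctv data row_offset width bytes_per_plane_row num_planes palette)


-- ===== LEMMAS AND PROOFS =====

-- proof-side helper: the LFSR bit stream A's loop consumes (not part of either port's code).
def lfsrSigAux : Nat → Int → List Int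
  | 0, _ => []
  | n + 1, r =>
    PySem.Int.band r 1 ::
      lfsrSigAux n ((if PySem.Int.band r 1 ≠ 0 then PySem.Int.bxor r (0xc3 <<< (1:Nat)) else r) >>> (1:Nat))

-- ANDing with a power of two yields 0 or that power (any sign of x).
lemma band_two_pow (x : Int) (k : Nat) :
    PySem.Int.band x ((2:Int)^k) = 0 ∨ PySem.Int.band x ((2:Int)^k) = (2:Int)^k := by
  have htn : ((2:Int)^k).toNat = 2^k := by
    rw [show ((2:Int)^k) = ((2^k : Nat) : Int) by push_cast; ring]; exact Int.toNat_natCast _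
  have h2 : (0:Int) ≤ (2:Int)^k := by positivity
  unfold PySem.Int.band
  by_cases hx : (0:Int) ≤ x
  · simp only [if_pos hx, if_pos h2, htn, Nat.and_two_pow]
    cases h : (x.toNat).testBit k
    · left; norm_num
    · right; push_cast; norm_num
  · simp only [if_neg hx, if_pos h2, htn]
    rw [Nat.land_comm, Nat.and_two_pow]
    cases h : ((-x-1).toNat).testBit k
    · right; norm_num
    · left; norm_num

-- the DCTV value's bit-6 field: shifting right by 6 gives 0 or 1.
lemma dctvOf_shift6 (r g b : Int) : dctvOf r g b >>> (6:Nat) = 0 ∨ dctvOf r g b >>> (6:Nat) = 1 := by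
  unfold dctvOf
  dsimp only
  generalize PySem.Int.bor (PySem.Int.bor (r <<< (16:Nat)) (g <<< (8:Nat))) b = rgb
  have h64 := band_two_pow (rgb <<< (2:Nat)) 6
  have h16 := band_two_pow (rgb >>> (19:Nat)) 4
  have h4 := band_two_pow (rgb >>> (5:Nat)) 2
  have h1 := band_two_pow (rgb >>> (15:Nat)) 0
  norm_num at h64 h16 h4 h1
  rcases h64 with h64 | h64 <;> rcases h16 with h16 | h16 <;> rcases h4 with h4 | h4 <;>
    rcases h1 with h1 | h1 <;> rw [h64, h16, h4, h1] <;> decide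

lemma gdv_shift6 (data : List Int) (row_offset x bytes_per_plane_row num_planes : Int)
    (palette : List (Int × Int × Int)) :
    get_dctv_value data row_offset x bytes_per_plane_row num_planes palette >>> (6:Nat) = 0 ∨
    get_dctv_value data row_offset x bytes_per_plane_row num_planes palette >>> (6:Nat) = 1 := by
  unfold get_dctv_value
  dsimp only
  split
  · left; decide
  · exact dctvOf_shift6 _ _ _

lemma lfsrSigAux_length (n : Nat) (r : Int) : (lfsrSigAux n r).length = n := by
  induction n generalizing r with
  | zero => rfl
  | succ m ih => simp [lfsrSigAux, ih]

lemma lfsrSigAux_mem (n : Nat) (r : Int) : ∀ b ∈ lfsrSigAux n r, b = 0 ∨ b = 1 := by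
  induction n generalizing r with
  | zero => simp [lfsrSigAux]
  | succ m ih =>
    intro b hb
    rcases List.mem_cons.1 hb with h | h
    · have h0 := PySem.Int.mod_nonneg r (b := 2) (by norm_num)
      have h1 := PySem.Int.mod_lt r (b := 2) (by norm_num)
      rw [h, PySem.Int.band_one]; omega
    · exact ih _ b h

-- A's interleaved loop from state r over pixel list xs is the pairwise check of the pixels'
-- intensity bits against the LFSR bit stream emitted from state r.
lemma is_dctv_loop_eq_zip_all (data : List Int) (row_offset : Int) (bytes_per_plane_row : Int) (num_planes : Int) (palette : List (Int × Int × Int)) :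
    ∀ (xs : List Int) (r : Int),
      is_dctv_loop data row_offset bytes_per_plane_row num_planes palette xs r =
      (xs.zip (lfsrSigAux xs.length r)).all
        (fun xe => get_dctv_value data row_offset xe.1 bytes_per_plane_row num_planes palette >>> (6:Nat) != xe.2)
  | [], r => rfl
  | x :: xs, r => by
    simp only [is_dctv_loop, List.length_cons, lfsrSigAux, List.zip_cons_cons, List.all_cons]
    by_cases h : (get_dctv_value data row_offset x bytes_per_plane_row num_planes palette >>> (6:Nat) == PySem.Int.band r 1) = true
    · simp [h, bne]
    · simp [h, bne,
        is_dctv_loop_eq_zip_all data row_offset bytes_per_plane_row num_planes palette xs _]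

-- a mismatch-free zip of 0/1 sequences is equality with the complemented table.
lemma allne_eq_beq (f : Int → Int) :
    ∀ (xs rs : List Int), (∀ x ∈ xs, f x = 0 ∨ f x = 1) → (∀ b ∈ rs, b = 0 ∨ b = 1) →
      xs.length = rs.length →
      ((xs.zip rs).all (fun p => f p.1 != p.2)) = (xs.map f == rs.map (fun b => 1 - b))
  | [], [], _, _, _ => by simp
  | [], _ :: _, _, _, hl => by simp at hl
  | _ :: _, [], _, _, hl => by simp at hl
  | x :: xs, r :: rs, hf, hr, hl => by
    simp only [List.zip_cons_cons, List.all_cons, List.map_cons, List.cons_beq_cons]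
    rw [allne_eq_beq f xs rs (fun a ha => hf a (List.mem_cons_of_mem _ ha))
      (fun a ha => hr a (List.mem_cons_of_mem _ ha)) (by simpa using hl)]
    congr 1
    rcases hf x List.mem_cons_self with h | h <;>
      rcases hr r List.mem_cons_self with h' | h' <;> rw [h, h'] <;> decide

set_option maxRecDepth 8000 in
lemma sig_decomp : dctvSignature = 0 :: (lfsrSigAux 255 0x7d).map (fun b => 1 - b) := by decide

-- Every 8//%-decomposed flat block scan is the straight scan of 8*n indices.
lemma fdm8 (n k : Int) (h0 : 0 ≤ k) (h8 : k < 8) :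
    PySem.Int.floordiv (8*n+k) 8 = n ∧ PySem.Int.mod (8*n+k) 8 = k := by
  have hd : PySem.Int.floordiv (8*n+k) 8 = n :=
    (PySem.Int.floordiv_eq_iff_of_pos (by norm_num)).2 (by constructor <;> omega)
  have hm := PySem.Int.floordiv_mul_add_mod (8*n+k) 8
  rw [hd] at hm
  exact ⟨hd, by omega⟩

lemma flat8 (g : Int → Int → Int) : ∀ (n : Nat),
    (PySem.List.pyRange 0 (n:Int) 1).flatMap (fun b => (PySem.List.pyRange 0 8 1).map (g b))
    = (PySem.List.pyRange 0 ((8*n : Nat):Int) 1).map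
        (fun x => g (PySem.Int.floordiv x 8) (PySem.Int.mod x 8)) := by
  intro n
  induction n with
  | zero => simp [PySem.List.pyRange_one_eq_nil]
  | succ m ih =>
    have hc : (((m+1 : Nat)):Int) = (m:Int) + 1 := by push_cast; ring
    have hc8 : (((8*(m+1) : Nat)):Int) = (8*m : Nat) + 8 := by push_cast; ring
    rw [hc, PySem.List.pyRange_one_succ_right (by positivity), List.flatMap_append, ih, hc8,
      PySem.List.pyRange_one_append 0 ((8*m : Nat) : Int) (((8*m : Nat) : Int) + 8)
        (by positivity) (by linarith [Int.natCast_nonneg (8*m)]),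
      List.map_append]
    congr 1
    simp only [List.flatMap_cons, List.flatMap_nil, List.append_nil]
    rw [PySem.List.pyRange_one ((8*m : Nat) : Int) (((8*m : Nat) : Int) + 8),
      show (((8*m : Nat) : Int) + 8) - ((8*m : Nat) : Int) = 8 by ring,
      show ((8:Int)).toNat = 8 from rfl,
      PySem.List.pyRange_one 0 8, show ((8:Int) - 0).toNat = 8 from rfl,
      List.map_map, List.map_map]
    refine List.map_congr_left (fun k hk => ?_)
    have hk8 : ((k:Int)) < 8 := by exact_mod_cast List.mem_range.1 hk
    have ha : ((8*m : Nat) : Int) + (k : Int) = 8*(m : Int) + (k : Int) := by push_cast; ring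
    simp only [Function.comp]
    rw [ha, (fdm8 (m:Int) (k:Int) (by positivity) hk8).1,
      (fdm8 (m:Int) (k:Int) (by positivity) hk8).2, zero_add]

-- Source B's byte-wise plane strip, characterised per pixel.
lemma planeRow_char (data : List Int) (base : Int) :
    planeRowBits data base = (PySem.List.pyRange 0 256 1).map (fun x =>
      PySem.Int.band
        ((if base + PySem.Int.floordiv x 8 < (data.length : Int)
          then PySem.List.pyGetD data (base + PySem.Int.floordiv x 8) 0 else 0)
          >>> (7 - PySem.Int.mod x 8).toNat) 1) := by
  unfold planeRowBits
  dsimp only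
  simp only [PySem.List.foldl_append_singleton_eq_map, PySem.List.foldl_append_eq_flatMap,
    List.nil_append]
  have h := flat8 (fun b k =>
    PySem.Int.band
      ((if base + b < (data.length : Int) then PySem.List.pyGetD data (base + b) 0 else 0)
        >>> (7 - k).toNat) 1) 32
  have h32 : ((32:Nat):Int) = 32 := by norm_num
  have h256 : (((8*32:Nat)):Int) = 256 := by norm_num
  rw [h32, h256] at h
  exact h

-- one plane's OR-combine step agrees with A's per-pixel plane step.
lemma step_pointwise (data : List Int) (off : Int) (s : Nat) (acc p : Int) :
    PySem.Int.bor acc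
      ((PySem.Int.band ((if off < (data.length:Int) then PySem.List.pyGetD data off 0 else 0) >>> s) 1 : Int) <<< p.toNat)
    = if off < (data.length:Int) ∧ PySem.Int.band (PySem.List.pyGetD data off 0 >>> s) 1 ≠ 0
      then PySem.Int.bor acc ((1:Int) <<< p.toNat) else acc := by
  by_cases ho : off < (data.length : Int)
  · simp only [if_pos ho]
    have hb := PySem.Int.band_one (PySem.List.pyGetD data off 0 >>> s)
    have h0 := PySem.Int.mod_nonneg (PySem.List.pyGetD data off 0 >>> s) (b := 2) (by norm_num)
    have h1 := PySem.Int.mod_lt (PySem.List.pyGetD data off 0 >>> s) (b := 2) (by norm_num)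
    rcases (by omega :
        PySem.Int.mod (PySem.List.pyGetD data off 0 >>> s) 2 = 0 ∨
        PySem.Int.mod (PySem.List.pyGetD data off 0 >>> s) 2 = 1) with h | h
    · rw [hb, h, if_neg (fun hc => hc.2 rfl)]
      simp [Int.shiftLeft_eq]
    · rw [hb, h, if_pos ⟨ho, one_ne_zero⟩]
  · rw [if_neg ho, if_neg (fun hc => ho hc.1)]
    simp [PySem.Int.band_one, Int.shiftLeft_eq]

-- B's staged decode equals the per-pixel extraction, plane by plane.
lemma gbp_zero (data : List Int) (ro x bpr : Int) : get_bitplane_pixel data ro x bpr 0 = 0 := by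
  unfold get_bitplane_pixel
  dsimp only
  rw [PySem.List.pyRange_one_eq_nil (le_refl (0:Int)), List.foldl_nil]

lemma gbp_succ (data : List Int) (ro x bpr : Int) (m : Nat) :
    get_bitplane_pixel data ro x bpr ((m:Int)+1) =
    (if ro + (m:Int) * bpr + PySem.Int.floordiv x 8 < (data.length:Int) ∧
        PySem.Int.band (PySem.List.pyGetD data (ro + (m:Int) * bpr + PySem.Int.floordiv x 8) 0
          >>> (7 - PySem.Int.mod x 8).toNat) 1 ≠ 0
      then PySem.Int.bor (get_bitplane_pixel data ro x bpr (m:Int)) ((1:Int) <<< ((m:Int)).toNat)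
      else get_bitplane_pixel data ro x bpr (m:Int)) := by
  unfold get_bitplane_pixel
  dsimp only
  rw [PySem.List.pyRange_one_succ_right (by positivity : (0:Int) ≤ (m:Int)),
    List.foldl_append, List.foldl_cons, List.foldl_nil]

lemma decode_eq (data : List Int) (ro bpr : Int) : ∀ (n : Nat),
    (PySem.List.pyRange 0 (n:Int) 1).foldl
      (fun pixels p =>
        (pixels.zip (planeRowBits data (ro + p * bpr))).map
          (fun ab => PySem.Int.bor ab.1 ((ab.2 : Int) <<< p.toNat)))
      (List.replicate 256 (0 : Int))
    = (PySem.List.pyRange 0 256 1).map (fun x => get_bitplane_pixel data ro x bpr (n:Int))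
  | 0 => by
    rw [show ((0:Nat):Int) = 0 from rfl, PySem.List.pyRange_one_eq_nil (le_refl (0:Int)),
      List.foldl_nil,
      List.map_congr_left (fun x _ => gbp_zero data ro x bpr),
      List.map_const', PySem.List.length_pyRange_one,
      show ((256:Int) - 0).toNat = 256 from rfl]
  | m + 1 => by
    have hc : (((m+1 : Nat)):Int) = (m:Int) + 1 := by push_cast; ring
    rw [hc, PySem.List.pyRange_one_succ_right (by positivity), List.foldl_append,
      decode_eq data ro bpr m, List.foldl_cons, List.foldl_nil,
      planeRow_char data (ro + (m:Int) * bpr), List.zip_map', List.map_map]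
    refine List.map_congr_left (fun x _ => ?_)
    rw [gbp_succ data ro x bpr m]
    simp only [Function.comp]
    exact step_pointwise data (ro + (m:Int) * bpr + PySem.Int.floordiv x 8)
      ((7 - PySem.Int.mod x 8).toNat) _ (m:Int)

lemma gbp_nonneg (data : List Int) (ro x bpr np : Int) :
    0 ≤ get_bitplane_pixel data ro x bpr np := by
  unfold get_bitplane_pixel
  dsimp only
  have H : ∀ (l : List Int) (acc : Int), 0 ≤ acc →
      0 ≤ l.foldl (fun pixel plane =>
        if ro + plane * bpr + PySem.Int.floordiv x 8 < (data.length:Int) ∧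
            PySem.Int.band (PySem.List.pyGetD data (ro + plane * bpr + PySem.Int.floordiv x 8) 0
              >>> (7 - PySem.Int.mod x 8).toNat) 1 ≠ 0
        then PySem.Int.bor pixel ((1:Int) <<< plane.toNat) else pixel) acc := by
    intro l
    induction l with
    | nil => intro acc h; simpa
    | cons a t ih =>
      intro acc h
      simp only [List.foldl_cons]
      apply ih
      split
      · rw [PySem.Int.bor_of_nonneg h (by rw [Int.shiftLeft_eq]; positivity)]
        positivity
      · exact h
  exact H _ 0 le_rfl

-- the intensity-table lookup equals A's per-pixel DCTV value, shifted.
lemma lookup_eq_gdv (data : List Int) (ro x bpr np : Int) (palette : List (Int × Int × Int)) :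
    (if get_bitplane_pixel data ro x bpr np < ((palette.map (fun t => dctvOf t.1 t.2.1 t.2.2)).length : Int)
      then PySem.List.pyGetD (palette.map (fun t => dctvOf t.1 t.2.1 t.2.2)) (get_bitplane_pixel data ro x bpr np) 0 >>> (6:Nat)
      else 0)
    = get_dctv_value data ro x bpr np palette >>> (6:Nat) := by
  have h0 : 0 ≤ get_bitplane_pixel data ro x bpr np := gbp_nonneg data ro x bpr np
  unfold get_dctv_value
  dsimp only
  rw [List.length_map]
  by_cases hlt : get_bitplane_pixel data ro x bpr np < (palette.length : Int)
  · rw [if_pos hlt, if_neg (by omega : ¬ get_bitplane_pixel data ro x bpr np ≥ (palette.length : Int))]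
    have hm := PySem.List.pyGetD_map (fun t : Int × Int × Int => dctvOf t.1 t.2.1 t.2.2) palette
      (get_bitplane_pixel data ro x bpr np) (0, 0, 0)
    simp only [show dctvOf 0 0 0 = 0 from by decide] at hm
    rw [hm]
    rfl
  · rw [if_neg hlt, if_pos (by omega)]
    decide

-- ===== VERDICT (by name: the statement is the Claim_ definition above) =====
theorem is_dctv_spec : Claim_equal_is_dctv := by
  unfold Claim_equal_is_dctv
  intro data ro w bpr np palette _ _
  unfold Spec_is_dctv is_dctv is_dctv_alt
  by_cases hg : w < 256 ∨ np < 2 ∨ palette = []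
  · simp only [if_pos hg]
  · simp only [if_neg hg]
    push Not at hg
    obtain ⟨-, hnp, -⟩ := hg
    obtain ⟨n, hn⟩ : ∃ n : Nat, np = (n:Int) := ⟨np.toNat, (Int.toNat_of_nonneg (by omega)).symm⟩
    rw [hn]
    rw [decode_eq data ro bpr n, List.map_map]
    simp only [Function.comp_def]
    rw [List.map_congr_left (fun x _ =>
      lookup_eq_gdv data ro x bpr (n:Int) palette)]
    rw [sig_decomp, PySem.List.pyRange_one_cons (show (0:Int) < 256 by norm_num),
      List.map_cons, List.cons_beq_cons]
    rw [is_dctv_loop_eq_zip_all, PySem.List.length_pyRange_one,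
      show (((256:Int)) - 1).toNat = 255 by decide]
    rw [allne_eq_beq (fun x => get_dctv_value data ro x bpr (n:Int) palette >>> (6:Nat))
      (PySem.List.pyRange 1 256 1) (lfsrSigAux 255 0x7d)
      (fun x _ => gdv_shift6 data ro x bpr (n:Int) palette)
      (lfsrSigAux_mem 255 0x7d)
      (by rw [PySem.List.length_pyRange_one, lfsrSigAux_length]; decide)]
    by_cases h0 : get_dctv_value data ro 0 bpr (n:Int) palette >>> (6:Nat) = 0
    · simp [h0]
    · simp [h0, bne]
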